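-- pv_equiv track=rewrite | github.com/leonardorimolo/Atitus | Trab_crimes/trab_crimes.py | calc_crimes
-- ===== SOURCE A (Python) =====
-- def calc_crimes(csv_reader,pontos_violentos,pontos_nao_violentos):
--     for linha in csv_reader:
--         #CRIME VIOLENTOS
--         pontos_violentos = pontos_violentos + (int(linha['Vitimas de Homicidio Doloso']) * 10)
--         pontos_violentos = pontos_violentos + (int(linha["Vitimas de Latrocinio"]) * 10)
--         pontos_violentos = pontos_violentos + (int(linha["Vitimas de Lesao Corp Seg Morte"]) * 10)
--         pontos_violentos = pontos_violentos + (int(linha[" Roubo de Veiculo"]) * 3)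
--         pontos_violentos = pontos_violentos + (int(linha[" Roubos"]) * 2 )
--         pontos_violentos = pontos_violentos + (int(linha[" Delitos Relacionados a Armas e Municoes"]) * 2)
--         pontos_violentos = pontos_violentos + (int(linha[" Entorpecentes Trafico"]) * 5)
--
--         #CRIMES NAO VIOLENTOS
--         pontos_nao_violentos = pontos_nao_violentos + (int(linha[" Entorpecentes Posse"]) * 2)
--
--         pontos_nao_violentos = pontos_nao_violentos + (int(linha["Furto de Veiculo "]) * 3)
--         pontos_nao_violentos = pontos_nao_violentos + (int(linha[" Furtos"]) * 3)
--         pontos_nao_violentos = pontos_nao_violentos + (int(linha[" Estelionato"]) * 1)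
--
--     return pontos_violentos,pontos_nao_violentos
-- ===== SOURCE B (Python) =====
-- VIOLENT = [
--     ("Vitimas de Homicidio Doloso", 10),
--     ("Vitimas de Latrocinio", 10),
--     ("Vitimas de Lesao Corp Seg Morte", 10),
--     (" Roubo de Veiculo", 3),
--     (" Roubos", 2),
--     (" Delitos Relacionados a Armas e Municoes", 2),
--     (" Entorpecentes Trafico", 5),
-- ]
--
-- NON_VIOLENT = [
--     (" Entorpecentes Posse", 2),
--     ("Furto de Veiculo ", 3),
--     (" Furtos", 3),
--     (" Estelionato", 1),
-- ]
--
-- def calc_crimes(csv_reader, pontos_violentos, pontos_nao_violentos):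
--     # Column-major: materialise the rows once, then make one pass per weighted
--     # column, adding weight * (column total over all rows).
--     rows = list(csv_reader)
--     for col, w in VIOLENT:
--         pontos_violentos += w * sum(int(r[col]) for r in rows)
--     for col, w in NON_VIOLENT:
--         pontos_nao_violentos += w * sum(int(r[col]) for r in rows)
--     return pontos_violentos, pontos_nao_violentos
-- ===== Notes on version B (the rewrite author's own statement) =====
-- stated objective: alternative
-- what changed: Transposes the traversal: instead of A's single row-major loop accumulating eleven weighted terms per row, B materialises the rows and makes one column-major pass per weighted column, adding weight * (column total over all rows); correct because integer addition commutes.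
import Mathlib
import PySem

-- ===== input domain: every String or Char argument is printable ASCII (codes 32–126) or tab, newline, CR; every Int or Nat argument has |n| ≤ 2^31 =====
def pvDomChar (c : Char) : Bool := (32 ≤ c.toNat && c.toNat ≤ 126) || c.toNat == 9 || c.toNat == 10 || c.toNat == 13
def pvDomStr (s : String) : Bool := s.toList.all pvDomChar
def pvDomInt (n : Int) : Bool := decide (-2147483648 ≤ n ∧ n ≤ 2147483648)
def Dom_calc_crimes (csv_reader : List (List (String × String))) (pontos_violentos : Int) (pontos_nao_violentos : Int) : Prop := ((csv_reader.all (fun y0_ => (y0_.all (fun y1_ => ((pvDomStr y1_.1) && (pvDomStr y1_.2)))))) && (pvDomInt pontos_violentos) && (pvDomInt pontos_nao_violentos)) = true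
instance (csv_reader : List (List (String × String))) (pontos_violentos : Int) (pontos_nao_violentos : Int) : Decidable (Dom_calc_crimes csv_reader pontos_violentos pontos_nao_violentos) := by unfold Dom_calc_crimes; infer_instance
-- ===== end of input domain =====

-- B transposes the traversal: A loops row-major adding eleven weighted terms per row;
-- B makes one column-major pass per weighted column (objective: alternative, same cost).

-- ===== PORT A =====
-- int(linha[k]): first-match lookup (Python dict has unique keys) then int(); none = KeyError/ValueError
def pvGetInt? (linha : List (String × String)) (k : String) : Option Int :=
  (linha.lookup k).bind PySem.Int.ofStr?

-- one iteration of A's loop body, threading the raise state through Option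
def pvStepA (st : Option (Int × Int)) (linha : List (String × String)) : Option (Int × Int) :=
  st.bind fun p =>
    (pvGetInt? linha "Vitimas de Homicidio Doloso").bind fun a1 =>
    (pvGetInt? linha "Vitimas de Latrocinio").bind fun a2 =>
    (pvGetInt? linha "Vitimas de Lesao Corp Seg Morte").bind fun a3 =>
    (pvGetInt? linha " Roubo de Veiculo").bind fun a4 =>
    (pvGetInt? linha " Roubos").bind fun a5 =>
    (pvGetInt? linha " Delitos Relacionados a Armas e Municoes").bind fun a6 =>
    (pvGetInt? linha " Entorpecentes Trafico").bind fun a7 =>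
    (pvGetInt? linha " Entorpecentes Posse").bind fun b1 =>
    (pvGetInt? linha "Furto de Veiculo ").bind fun b2 =>
    (pvGetInt? linha " Furtos").bind fun b3 =>
    (pvGetInt? linha " Estelionato").map fun b4 =>
      (p.1 + a1 * 10 + a2 * 10 + a3 * 10 + a4 * 3 + a5 * 2 + a6 * 2 + a7 * 5,
       p.2 + b1 * 2 + b2 * 3 + b3 * 3 + b4 * 1)

def calc_crimes (csv_reader : List (List (String × String))) (pontos_violentos : Int) (pontos_nao_violentos : Int) : Int × Int :=
  (csv_reader.foldl pvStepA (some (pontos_violentos, pontos_nao_violentos))).getD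
    (pontos_violentos, pontos_nao_violentos)

-- ===== PORT B =====
def pvViolent : List (String × Int) :=
  [("Vitimas de Homicidio Doloso", 10), ("Vitimas de Latrocinio", 10),
   ("Vitimas de Lesao Corp Seg Morte", 10), (" Roubo de Veiculo", 3), (" Roubos", 2),
   (" Delitos Relacionados a Armas e Municoes", 2), (" Entorpecentes Trafico", 5)]

def pvNonViolent : List (String × Int) :=
  [(" Entorpecentes Posse", 2), ("Furto de Veiculo ", 3), (" Furtos", 3), (" Estelionato", 1)]

-- sum(int(r[col]) for r in rows): one pass over ALL rows for ONE column
def pvColSum? (rows : List (List (String × String))) (col : String) : Option Int :=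
  rows.foldl
    (fun acc r => acc.bind fun s => (pvGetInt? r col).map fun v => s + v)
    (some 0)

-- 'for col, w in TABLE: total += w * sum(...)'
def pvAccTable? (rows : List (List (String × String))) (table : List (String × Int)) (init : Int) : Option Int :=
  table.foldl
    (fun acc cw => acc.bind fun t => (pvColSum? rows cw.1).map fun s => t + cw.2 * s)
    (some init)

def calc_crimes_alt (csv_reader : List (List (String × String))) (pontos_violentos : Int) (pontos_nao_violentos : Int) : Int × Int :=
  match pvAccTable? csv_reader pvViolent pontos_violentos,
        pvAccTable? csv_reader pvNonViolent pontos_nao_violentos with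
  | some a, some b => (a, b)
  | _, _ => (pontos_violentos, pontos_nao_violentos)

-- ===== PRECONDITION & SPEC =====
-- exactly the inputs where Python A returns: every row carries all eleven columns with int()-parsable values
def pvKeys : List String :=
  ["Vitimas de Homicidio Doloso", "Vitimas de Latrocinio", "Vitimas de Lesao Corp Seg Morte",
   " Roubo de Veiculo", " Roubos", " Delitos Relacionados a Armas e Municoes",
   " Entorpecentes Trafico", " Entorpecentes Posse", "Furto de Veiculo ", " Furtos", " Estelionato"]

def Pre_calc_crimes (csv_reader : List (List (String × String))) (pontos_violentos : Int) (pontos_nao_violentos : Int) : Prop :=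
  (csv_reader.all fun linha =>
    pvKeys.all fun k => ((linha.lookup k).bind PySem.Int.ofStr?).isSome) = true

instance (csv_reader : List (List (String × String))) (pontos_violentos : Int) (pontos_nao_violentos : Int) : Decidable (Pre_calc_crimes csv_reader pontos_violentos pontos_nao_violentos) := by unfold Pre_calc_crimes; infer_instance

def pvWitness_calc_crimes : (List (List (String × String))) × Int × Int :=
  ([[("Vitimas de Homicidio Doloso", "1"), ("Vitimas de Latrocinio", "0"),
     ("Vitimas de Lesao Corp Seg Morte", "2"), (" Roubo de Veiculo", "3"), (" Roubos", "4"),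
     (" Delitos Relacionados a Armas e Municoes", "0"), (" Entorpecentes Trafico", "1"),
     (" Entorpecentes Posse", "2"), ("Furto de Veiculo ", "1"), (" Furtos", "5"),
     (" Estelionato", "-1")]], 0, 0)

def Spec_calc_crimes (csv_reader : List (List (String × String))) (pontos_violentos : Int) (pontos_nao_violentos : Int) (out : Int × Int) : Prop := out = calc_crimes_alt csv_reader pontos_violentos pontos_nao_violentos
instance (csv_reader : List (List (String × String))) (pontos_violentos : Int) (pontos_nao_violentos : Int) (out : Int × Int) : Decidable (Spec_calc_crimes csv_reader pontos_violentos pontos_nao_violentos out) := by unfold Spec_calc_crimes; infer_instance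

-- ===== CLAIM (what is proved, stated in full; the proofs are below) =====
def Claim_equal_calc_crimes : Prop := ∀ (csv_reader : List (List (String × String))) (pontos_violentos : Int) (pontos_nao_violentos : Int), Dom_calc_crimes csv_reader pontos_violentos pontos_nao_violentos → Pre_calc_crimes csv_reader pontos_violentos pontos_nao_violentos → Spec_calc_crimes csv_reader pontos_violentos pontos_nao_violentos (calc_crimes csv_reader pontos_violentos pontos_nao_violentos)

-- ===== LEMMAS AND PROOFS =====
-- the (total) value of column k in row r, meaningful when Pre_ guarantees it parses
def pvVal (r : List (String × String)) (k : String) : Int :=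
  ((r.lookup k).bind PySem.Int.ofStr?).getD 0

def pvRowOK (r : List (String × String)) : Prop :=
  (pvKeys.all fun k => ((r.lookup k).bind PySem.Int.ofStr?).isSome) = true

-- weighted total of one row over a table
def pvRowSum (r : List (String × String)) (table : List (String × Int)) : Int :=
  (table.map fun cw => cw.2 * pvVal r cw.1).sum

lemma pvGetInt_ok {r : List (String × String)} (h : pvRowOK r) {k : String}
    (hk : k ∈ pvKeys) : pvGetInt? r k = some (pvVal r k) := by
  have := (List.all_eq_true.mp h) k hk
  unfold pvGetInt? pvVal
  cases hx : (r.lookup k).bind PySem.Int.ofStr? with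
  | none => rw [hx] at this; simp at this
  | some v => simp

-- A's step on a valid row produces exactly the two weighted row totals
lemma pvStepA_ok {r : List (String × String)} (h : pvRowOK r) (pv pn : Int) :
    pvStepA (some (pv, pn)) r = some (pv + pvRowSum r pvViolent, pn + pvRowSum r pvNonViolent) := by
  have g : ∀ k ∈ pvKeys, pvGetInt? r k = some (pvVal r k) := fun k hk => pvGetInt_ok h hk
  simp only [pvStepA, Option.bind_some]
  rw [g _ (by simp [pvKeys]), g _ (by simp [pvKeys]), g _ (by simp [pvKeys]),
      g _ (by simp [pvKeys]), g _ (by simp [pvKeys]), g _ (by simp [pvKeys]),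
      g _ (by simp [pvKeys]), g _ (by simp [pvKeys]), g _ (by simp [pvKeys]),
      g _ (by simp [pvKeys]), g _ (by simp [pvKeys])]
  simp only [Option.bind_some, Option.map_some, Option.some.injEq, Prod.mk.injEq]
  refine ⟨?_, ?_⟩ <;> simp [pvRowSum, pvViolent, pvNonViolent] <;> ring

-- A's fold over all rows, row-major
lemma pvFoldA (rows : List (List (String × String))) (hrows : ∀ r ∈ rows, pvRowOK r)
    (pv pn : Int) :
    rows.foldl pvStepA (some (pv, pn)) =
      some (pv + (rows.map fun r => pvRowSum r pvViolent).sum,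
            pn + (rows.map fun r => pvRowSum r pvNonViolent).sum) := by
  induction rows generalizing pv pn with
  | nil => simp
  | cons r rs ih =>
    simp only [List.foldl_cons, List.map_cons, List.sum_cons]
    rw [pvStepA_ok (hrows r (by simp)) pv pn,
        ih (fun x hx => hrows x (by simp [hx]))]
    simp only [Option.some.injEq, Prod.mk.injEq]
    refine ⟨by ring, by ring⟩

-- B's single-column pass equals the column total
lemma pvColSum_fold (rows : List (List (String × String))) {k : String} (hk : k ∈ pvKeys)
    (hrows : ∀ r ∈ rows, pvRowOK r) (s : Int) :
    rows.foldl (fun acc r => acc.bind fun s => (pvGetInt? r k).map fun v => s + v) (some s) =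
      some (s + (rows.map fun r => pvVal r k).sum) := by
  induction rows generalizing s with
  | nil => simp
  | cons r rs ih =>
    simp only [List.foldl_cons, Option.bind_some]
    rw [pvGetInt_ok (hrows r (by simp)) hk]
    simp only [Option.map_some]
    rw [ih (fun x hx => hrows x (by simp [hx]))]
    simp only [List.map_cons, List.sum_cons, Option.some.injEq]
    ring

lemma pvColSum_ok (rows : List (List (String × String))) {k : String} (hk : k ∈ pvKeys)
    (hrows : ∀ r ∈ rows, pvRowOK r) :
    pvColSum? rows k = some ((rows.map fun r => pvVal r k).sum) := by
  unfold pvColSum?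
  rw [pvColSum_fold rows hk hrows 0]
  simp

-- B's table pass
lemma pvAccTable_ok (rows : List (List (String × String))) (table : List (String × Int))
    (htab : ∀ cw ∈ table, cw.1 ∈ pvKeys) (hrows : ∀ r ∈ rows, pvRowOK r) (init : Int) :
    pvAccTable? rows table init =
      some (init + (table.map fun cw => cw.2 * (rows.map fun r => pvVal r cw.1).sum).sum) := by
  unfold pvAccTable?
  induction table generalizing init with
  | nil => simp
  | cons cw tl ih =>
    simp only [List.foldl_cons, Option.bind_some]
    rw [pvColSum_ok rows (htab cw (by simp)) hrows]
    simp only [Option.map_some]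
    rw [ih (fun x hx => htab x (by simp [hx]))]
    simp only [List.map_cons, List.sum_cons, Option.some.injEq]
    ring

-- pointwise sums distribute over a list sum
lemma pvSumMapAdd {α : Type} (l : List α) (f g : α → Int) :
    (l.map fun x => f x + g x).sum = (l.map f).sum + (l.map g).sum := by
  induction l with
  | nil => simp
  | cons x xs ih => simp [ih]; ring

lemma pvSumMapMulLeft {α : Type} (l : List α) (c : Int) (f : α → Int) :
    (l.map fun x => c * f x).sum = c * (l.map f).sum := by
  induction l with
  | nil => simp
  | cons x xs ih => simp [ih]; ring

-- swap of summation order: row-major totals = column-major totals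
lemma pvSwap (rows : List (List (String × String))) (table : List (String × Int)) :
    (rows.map fun r => pvRowSum r table).sum =
      (table.map fun cw => cw.2 * (rows.map fun r => pvVal r cw.1).sum).sum := by
  induction table with
  | nil => simp [pvRowSum]
  | cons cw tl ih =>
    simp only [List.map_cons, List.sum_cons, pvRowSum] at *
    rw [pvSumMapAdd rows (fun r => cw.2 * pvVal r cw.1)
          (fun r => (tl.map fun c => c.2 * pvVal r c.1).sum),
        pvSumMapMulLeft, ih]

-- ===== VERDICT (by name: the statement is the Claim_ definition above) =====
theorem calc_crimes_spec : Claim_equal_calc_crimes := by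
  intro csv pv pn _ hpre
  have hrows : ∀ r ∈ csv, pvRowOK r := by
    intro r hr
    exact (List.all_eq_true.mp hpre) r hr
  unfold Spec_calc_crimes calc_crimes calc_crimes_alt
  rw [pvFoldA csv hrows pv pn,
      pvAccTable_ok csv pvViolent (by decide) hrows pv,
      pvAccTable_ok csv pvNonViolent (by decide) hrows pn,
      pvSwap csv pvViolent, pvSwap csv pvNonViolent]
  rfl
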